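-- pv_equiv track=rewrite | github.com/JosephPolaski/Word-Counter | word_count.py | word_count_sort
-- ===== SOURCE A (Python) =====
-- def word_count_sort(word_count_list):
--     """
--     This is an implementation of an insertion sort. It will sort the list of word count (key, value) tuples
--     by value in descending order so that the word with the highest occurrence is at index 0.
--
--     :param word_count_list: unsorted list of tuples of all key:value pairs in hash_map formatted (key, value)
--     :return: word_count_list: the same list entered, but sorted in descending order.
--     """
--
--     for index in range(1, len(word_count_list)):
--         # initialize pointers
--         value = word_count_list[index]  # starts at the tuple in index 1
--         position = index - 1  # initialize to start at 0
--
--         # move items to a higher index position while their value is less than the value at the next index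
--         # compare values in tuple[1] but swap entire tuple
--         while position >= 0 and word_count_list[position][1] < value[1]:
--             word_count_list[position + 1] = word_count_list[position]  # swap the tuple at position into next index
--             position -= 1  # decrement to fill lower index and break loop
--
--         word_count_list[position + 1] = value  # move higher number left one index
--
--     return word_count_list
-- ===== SOURCE B (Python) =====
-- def word_count_sort(word_count_list):
--     """Bucket-by-count re-implementation: one pass groups the tuples by their
--     count (encounter order kept per bucket, so the sort is stable), then the
--     distinct counts are walked in descending order to emit the result.
--     Writes back in place and returns the same list object, like the original."""
--     buckets = {}
--     for t in word_count_list: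
--         buckets.setdefault(t[1], []).append(t)
--     result = []
--     for count in sorted(buckets, reverse=True):
--         result.extend(buckets[count])
--     word_count_list[:] = result
--     return word_count_list
-- ===== Notes on version B (the rewrite author's own statement) =====
-- stated objective: faster
-- what changed: Replaces the in-place insertion sort (shift-and-insert scan per element) with a single grouping pass into a dict of count-buckets followed by emitting the buckets in descending order of their distinct count keys.
import Mathlib
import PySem

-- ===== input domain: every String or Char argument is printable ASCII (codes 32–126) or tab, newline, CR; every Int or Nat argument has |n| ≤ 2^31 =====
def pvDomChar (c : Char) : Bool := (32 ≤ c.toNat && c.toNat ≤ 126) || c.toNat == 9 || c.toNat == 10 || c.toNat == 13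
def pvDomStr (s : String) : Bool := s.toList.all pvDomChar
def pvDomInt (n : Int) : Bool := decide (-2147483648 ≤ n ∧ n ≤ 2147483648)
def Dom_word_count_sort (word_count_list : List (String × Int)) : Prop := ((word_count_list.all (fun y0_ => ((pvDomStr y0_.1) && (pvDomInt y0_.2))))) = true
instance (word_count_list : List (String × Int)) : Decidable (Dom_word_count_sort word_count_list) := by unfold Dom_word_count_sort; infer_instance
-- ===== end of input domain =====

-- A is an in-place insertion sort by count descending; B buckets the tuples by count in one pass
-- and emits the buckets by descending count (objective: asymptotically faster).  Both A and B
-- mutate the argument list in place in Python; the equivalence proved here is about the return value.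

-- ===== PORT A =====
-- the 'while position >= 0 and word_count_list[position][1] < value[1]' loop, with the final
-- 'word_count_list[position + 1] = value' folded into both exit points; posSucc encodes position + 1
def wcsShift (value : String × Int) : List (String × Int) → Nat → List (String × Int)
  | lst, 0 => lst.set 0 value
  | lst, p + 1 =>
      if (PySem.List.pyGetD lst (p : Int) ("", 0)).2 < value.2 then
        wcsShift value (lst.set (p + 1) (PySem.List.pyGetD lst (p : Int) ("", 0))) p
      else lst.set (p + 1) value

def word_count_sort (word_count_list : List (String × Int)) : List (String × Int) :=
  (PySem.List.pyRange 1 (PySem.List.len word_count_list) 1).foldl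
    (fun lst index =>
      let value := PySem.List.pyGetD lst index ("", 0)
      wcsShift value lst ((index - 1).toNat + 1))
    word_count_list

-- ===== PORT B =====
def word_count_sort_alt (word_count_list : List (String × Int)) : List (String × Int) :=
  let buckets := word_count_list.foldl
    (fun d t => d.modify t.2 [] (fun b => b ++ [t])) PySem.Dict.empty
  (PySem.List.sorted buckets.keys (fun c => c) true).foldl
    (fun acc c => acc ++ buckets.getD c []) []

-- ===== PRECONDITION & SPEC =====
def Spec_word_count_sort (word_count_list : List (String × Int)) (out : List (String × Int)) : Prop := out = word_count_sort_alt word_count_list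
instance (word_count_list : List (String × Int)) (out : List (String × Int)) : Decidable (Spec_word_count_sort word_count_list out) := by unfold Spec_word_count_sort; infer_instance

-- ===== CLAIM (what is proved, stated in full; the proofs are below) =====
def Claim_equal_word_count_sort : Prop := ∀ (word_count_list : List (String × Int)), Dom_word_count_sort word_count_list → Spec_word_count_sort word_count_list (word_count_sort word_count_list)

-- ===== LEMMAS AND PROOFS =====

-- the reference: Python's stable descending sort by count, in its foldl/insertBy form
def insDesc (v : String × Int) (m : List (String × Int)) : List (String × Int) :=
  PySem.List.insertBy (fun a b => decide (b.2 < a.2)) v m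

def sRef (l : List (String × Int)) : List (String × Int) :=
  l.foldl (fun acc t => insDesc t acc) []

def DescKey (m : List (String × Int)) : Prop := m.Pairwise (fun a b => b.2 ≤ a.2)

theorem sorted_eq_sRef (l : List (String × Int)) :
    PySem.List.sorted l (fun t => t.2) true = sRef l :=
  PySem.List.sorted_rev_eq_foldl_insertBy l (fun t => t.2)

theorem sRef_pairwise (l : List (String × Int)) : DescKey (sRef l) := by
  rw [DescKey, ← sorted_eq_sRef]
  exact PySem.List.sorted_pairwise_rev l (fun t => t.2)

theorem sRef_perm (l : List (String × Int)) : (sRef l).Perm l := by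
  rw [← sorted_eq_sRef]
  exact PySem.List.sorted_perm l (fun t => t.2) true

theorem sRef_length (l : List (String × Int)) : (sRef l).length = l.length :=
  (sRef_perm l).length_eq

theorem sRef_append (l : List (String × Int)) (t : String × Int) :
    sRef (l ++ [t]) = insDesc t (sRef l) := by
  simp [sRef, List.foldl_append]

theorem insertBy_eq_tw_dw (before : (String × Int) → (String × Int) → Bool)
    (v : String × Int) (m : List (String × Int)) :
    PySem.List.insertBy before v m =
      m.takeWhile (fun y => !before v y) ++ v :: m.dropWhile (fun y => !before v y) := by
  induction m with
  | nil => simp [PySem.List.insertBy]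
  | cons y ys ih =>
      by_cases h : before v y = true
      · simp [PySem.List.insertBy, h]
      · simp [PySem.List.insertBy, h, ih]

-- in a list with non-increasing counts, everything past the first element with count < c has count < c
theorem dropWhile_lt (m : List (String × Int)) (c : Int) (hm : DescKey m) :
    ∀ y ∈ m.dropWhile (fun y => !decide (y.2 < c)), y.2 < c := by
  induction m with
  | nil => simp
  | cons h rest ih =>
      rw [List.dropWhile_cons]
      split_ifs with hp
      · exact ih (List.pairwise_cons.mp hm).2
      · have hh : h.2 < c := by simpa using hp
        intro y hy
        rcases List.mem_cons.mp hy with hy' | hy'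
        · exact hy' ▸ hh
        · have := (List.pairwise_cons.mp hm).1 y hy'
          omega

theorem filter_sRef (l : List (String × Int)) (c : Int) :
    (sRef l).filter (fun t => t.2 == c) = l.filter (fun t => t.2 == c) := by
  induction l using List.reverseRecOn with
  | nil => rfl
  | append_singleton l t ih =>
      rw [sRef_append, insDesc, insertBy_eq_tw_dw]
      have hsplit : ((sRef l).takeWhile (fun y => !decide (y.2 < t.2))).filter (fun y => y.2 == c) ++
          ((sRef l).dropWhile (fun y => !decide (y.2 < t.2))).filter (fun y => y.2 == c) =
          l.filter (fun y => y.2 == c) := by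
        rw [← List.filter_append, List.takeWhile_append_dropWhile]
        exact ih
      by_cases hc : t.2 = c
      · have hwf : ((sRef l).dropWhile (fun y => !decide (y.2 < t.2))).filter (fun y => y.2 == c) = [] := by
          rw [List.filter_eq_nil_iff]
          intro y hy
          have := dropWhile_lt (sRef l) t.2 (sRef_pairwise l) y hy
          simp only [beq_iff_eq]
          omega
        simp only [List.filter_append, List.filter_cons]
        rw [hwf] at hsplit ⊢
        simp only [List.append_nil] at hsplit
        simp [hc, ← hsplit]
      · simp only [List.filter_append, List.filter_cons]
        have : ((t.2 == c) = false) := by simpa using hc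
        simp [this, hsplit]

-- list-surgery helpers for the array reads/writes of A's inner loop
theorem getD_at_len {α : Type} (u : List α) (x : α) (s : List α) (d : α) :
    (u ++ x :: s).getD u.length d = x := by
  induction u with
  | nil => rfl
  | cons a u ih => simp

theorem set_mid {α : Type} (P : List α) (x y z : α) (s : List α) :
    (P ++ x :: y :: s).set (P.length + 1) z = P ++ x :: z :: s := by
  induction P with
  | nil => rfl
  | cons a P ih => simp [ih]

-- A's inner loop: with the prefix split as u ++ w, every shifted element (w) having count < value's
-- and the stop element (last of u) not, the loop shifts w right and drops value after u
theorem wcsShift_spec (w : List (String × Int)) :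
    ∀ (u suf : List (String × Int)) (v junk : String × Int),
      (∀ y ∈ u, ¬(y.2 < v.2)) → (∀ y ∈ w, y.2 < v.2) →
      wcsShift v (u ++ w ++ junk :: suf) (u.length + w.length) = u ++ v :: (w ++ suf) := by
  induction w using List.reverseRecOn with
  | nil =>
      intro u suf v junk hU _
      induction u using List.reverseRecOn with
      | nil => simp [wcsShift]
      | append_singleton u' b _ =>
          have hb : ¬(b.2 < v.2) := hU b (by simp)
          have hlen : (u' ++ [b]).length + ([] : List (String × Int)).length = u'.length + 1 := by
            simp
          rw [hlen, wcsShift]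
          have hlst : (u' ++ [b]) ++ ([] : List (String × Int)) ++ junk :: suf =
              u' ++ b :: (junk :: suf) := by simp
          rw [hlst, PySem.List.pyGetD_natCast, getD_at_len]
          simp only [if_neg hb]
          rw [set_mid]
          simp
  | append_singleton w' b ih =>
      intro u suf v junk hU hW
      have hb : b.2 < v.2 := hW b (by simp)
      have hlen : u.length + (w' ++ [b]).length = (u ++ w').length + 1 := by
        simp; omega
      rw [hlen, wcsShift]
      have hlst : u ++ (w' ++ [b]) ++ junk :: suf = (u ++ w') ++ b :: (junk :: suf) := by
        simp [List.append_assoc]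
      rw [hlst, PySem.List.pyGetD_natCast, getD_at_len]
      simp only [if_pos hb]
      rw [set_mid]
      have hih := ih u (b :: suf) v b hU (fun y hy => hW y (by simp [hy]))
      have hlen2 : (u ++ w').length = u.length + w'.length := by simp
      rw [List.append_assoc, hlen2]
      simpa using hih

theorem word_count_sort_eq_sRef (xs : List (String × Int)) :
    word_count_sort xs = sRef xs := by
  rcases hxs : xs with _ | ⟨x0, rest⟩
  · rfl
  rw [← hxs]
  have hne : xs ≠ [] := by rw [hxs]; simp
  have key : ∀ m : Nat, 1 ≤ m → m ≤ xs.length →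
      (PySem.List.pyRange 1 (m : Int) 1).foldl
        (fun lst index =>
          let value := PySem.List.pyGetD lst index ("", 0)
          wcsShift value lst ((index - 1).toNat + 1)) xs
      = sRef (xs.take m) ++ xs.drop m := by
    intro m
    induction m with
    | zero => omega
    | succ m ih =>
        intro _ hlen
        by_cases hm : m = 0
        · subst hm
          rw [show (((0 + 1 : Nat)) : Int) = 1 by norm_num,
            PySem.List.pyRange_one_eq_nil (le_refl 1), List.foldl_nil]
          rcases hxs2 : xs with _ | ⟨x, r⟩
          · exact absurd hxs2 hne
          · simp [sRef, insDesc, PySem.List.insertBy]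
        · have h1m : 1 ≤ m := by omega
          have hmlen : m ≤ xs.length := by omega
          have hmlt : m < xs.length := by omega
          rw [show (((m + 1 : Nat)) : Int) = (m : Int) + 1 by push_cast; ring,
            PySem.List.pyRange_one_succ_right (by exact_mod_cast h1m), List.foldl_append,
            List.foldl_cons, List.foldl_nil, ih h1m hmlen]
          have hPlen : (sRef (xs.take m)).length = m := by
            rw [sRef_length, List.length_take]; omega
          have hdrop : xs.drop m = xs[m] :: xs.drop (m + 1) := List.drop_eq_getElem_cons hmlt
          rw [hdrop]
          have hval : PySem.List.pyGetD (sRef (xs.take m) ++ xs[m] :: xs.drop (m + 1)) (m : Int) ("", 0)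
              = xs[m] := by
            rw [PySem.List.pyGetD_natCast]
            have := getD_at_len (sRef (xs.take m)) xs[m] (xs.drop (m + 1)) ("", 0)
            rw [hPlen] at this
            exact this
          simp only [hval]
          have hpos : (((m : Int)) - 1).toNat + 1 = m := by omega
          rw [hpos]
          -- split the sorted prefix around the insertion point of xs[m]
          have hsplit : sRef (xs.take m) =
              (sRef (xs.take m)).takeWhile (fun y => !decide (y.2 < xs[m].2)) ++
              (sRef (xs.take m)).dropWhile (fun y => !decide (y.2 < xs[m].2)) :=
            (List.takeWhile_append_dropWhile).symm
          have hU : ∀ y ∈ (sRef (xs.take m)).takeWhile (fun y => !decide (y.2 < xs[m].2)),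
              ¬(y.2 < xs[m].2) := by
            intro y hy
            have := List.mem_takeWhile_imp hy
            simpa using this
          have hW : ∀ y ∈ (sRef (xs.take m)).dropWhile (fun y => !decide (y.2 < xs[m].2)),
              y.2 < xs[m].2 :=
            dropWhile_lt _ _ (sRef_pairwise _)
          have hlen2 : ((sRef (xs.take m)).takeWhile (fun y => !decide (y.2 < xs[m].2))).length +
              ((sRef (xs.take m)).dropWhile (fun y => !decide (y.2 < xs[m].2))).length = m := by
            rw [← List.length_append, ← hsplit, hPlen]
          have hshift := wcsShift_spec
            ((sRef (xs.take m)).dropWhile (fun y => !decide (y.2 < xs[m].2)))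
            ((sRef (xs.take m)).takeWhile (fun y => !decide (y.2 < xs[m].2)))
            (xs.drop (m + 1)) xs[m] xs[m] hU hW
          rw [hlen2] at hshift
          rw [List.append_assoc] at hshift
          rw [hsplit, List.append_assoc, hshift]
          -- and recognise the result as the next sorted prefix
          have htake : xs.take (m + 1) = xs.take m ++ [xs[m]] := by
            rw [List.take_add_one, List.getElem?_eq_getElem hmlt]
            rfl
          rw [htake, sRef_append, insDesc, insertBy_eq_tw_dw]
          simp [List.append_assoc]
  have hfin := key xs.length (by rw [hxs]; simp) (le_refl _)
  simp only [List.take_length, List.drop_length, List.append_nil] at hfin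
  simpa [word_count_sort] using hfin

-- B as a flat emission of per-count filters over the strictly descending distinct counts
def bKeys (xs : List (String × Int)) : List Int :=
  PySem.List.sorted (PySem.Set.ofList (xs.map (fun t => t.2))) (fun c => c) true

theorem word_count_sort_alt_eq_flat (xs : List (String × Int)) :
    word_count_sort_alt xs =
      (bKeys xs).flatMap (fun c => xs.filter (fun t => t.2 == c)) := by
  unfold word_count_sort_alt
  have hkeys : (xs.foldl (fun d t => d.modify t.2 [] (fun b => b ++ [t]))
      (PySem.Dict.empty : PySem.Dict Int (List (String × Int)))).keys =
      PySem.Set.ofList (xs.map (fun t => t.2)) := by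
    rw [PySem.Dict.keys_foldl_modify_key xs (fun t => t.2) [] (fun _ t b => b ++ [t])]
    rfl
  have hgetD : ∀ c : Int, (xs.foldl (fun d t => d.modify t.2 [] (fun b => b ++ [t]))
      (PySem.Dict.empty : PySem.Dict Int (List (String × Int)))).getD c [] =
      xs.filter (fun t => t.2 == c) := by
    intro c
    have hmap : xs.foldl (fun d t => d.modify t.2 [] (fun b => b ++ [t]))
        (PySem.Dict.empty : PySem.Dict Int (List (String × Int))) =
        (xs.map (fun t => (t.2, t))).foldl
          (fun d p => d.modify p.1 [] (fun b => b ++ [p.2])) PySem.Dict.empty := by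
      rw [List.foldl_map]
    rw [hmap, PySem.Dict.getD_foldl_modify_append]
    rw [List.filter_map]
    simp [Function.comp_def, List.map_map]
  simp only [hkeys, hgetD]
  rw [PySem.List.foldl_append_eq_flatMap]
  rfl

theorem bKeys_nodup (xs : List (String × Int)) : (bKeys xs).Nodup :=
  (PySem.List.sorted_perm _ _ _).nodup_iff.mpr
    (PySem.Set.nodup_ofList (xs.map (fun t => t.2)))

theorem bKeys_pairwise (xs : List (String × Int)) : (bKeys xs).Pairwise (fun a b => b < a) := by
  have h1 : (bKeys xs).Pairwise (fun a b => b ≤ a) :=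
    PySem.List.sorted_pairwise_rev _ _
  have h2 : (bKeys xs).Pairwise (· ≠ ·) := bKeys_nodup xs
  exact (h1.and h2).imp (fun h => lt_of_le_of_ne h.1 (Ne.symm h.2))

theorem mem_bKeys (xs : List (String × Int)) (c : Int) :
    c ∈ bKeys xs ↔ c ∈ xs.map (fun t => t.2) := by
  rw [bKeys, PySem.List.mem_sorted]
  exact PySem.Set.mem_ofList _ _

theorem flat_desc (xs : List (String × Int)) (K : List Int)
    (hK : K.Pairwise (fun a b => b < a)) :
    DescKey (K.flatMap (fun c => xs.filter (fun t => t.2 == c))) := by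
  induction K with
  | nil => exact List.Pairwise.nil
  | cons c K' ih =>
      rw [List.flatMap_cons, DescKey, List.pairwise_append]
      refine ⟨?_, ih (List.pairwise_cons.mp hK).2, ?_⟩
      · refine List.pairwise_of_forall_mem_list ?_
        intro a ha b hb
        have ha2 : a.2 = c := by simpa using (List.mem_filter.mp ha).2
        have hb2 : b.2 = c := by simpa using (List.mem_filter.mp hb).2
        omega
      · intro a ha b hb
        have ha2 : a.2 = c := by simpa using (List.mem_filter.mp ha).2
        rcases List.mem_flatMap.mp hb with ⟨c', hc', hbf⟩
        have hb2 : b.2 = c' := by simpa using (List.mem_filter.mp hbf).2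
        have : c' < c := (List.pairwise_cons.mp hK).1 c' hc'
        omega

theorem alt_pairwise (xs : List (String × Int)) : DescKey (word_count_sort_alt xs) := by
  rw [word_count_sort_alt_eq_flat]
  exact flat_desc xs (bKeys xs) (bKeys_pairwise xs)

theorem alt_filter (xs : List (String × Int)) (c : Int) :
    (word_count_sort_alt xs).filter (fun t => t.2 == c) = xs.filter (fun t => t.2 == c) := by
  rw [word_count_sort_alt_eq_flat, List.filter_flatMap]
  have hblock : ∀ c' : Int, (xs.filter (fun t => t.2 == c')).filter (fun t => t.2 == c) =
      if c' = c then xs.filter (fun t => t.2 == c) else [] := by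
    intro c'
    rw [List.filter_filter]
    by_cases h : c' = c
    · subst h
      simp
    · rw [List.filter_eq_nil_iff.mpr]
      · simp [h]
      · intro t _
        simp only [Bool.and_eq_true, beq_iff_eq]
        omega
  simp only [hblock]
  have hflat : ∀ K : List Int, K.Nodup →
      K.flatMap (fun c' => if c' = c then xs.filter (fun t => t.2 == c) else []) =
        if c ∈ K then xs.filter (fun t => t.2 == c) else [] := by
    intro K hnd
    induction K with
    | nil => simp
    | cons k K' ih =>
        rw [List.flatMap_cons, ih (List.nodup_cons.mp hnd).2]
        by_cases hk : k = c
        · subst hk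
          have : k ∉ K' := (List.nodup_cons.mp hnd).1
          simp [this]
        · simp [hk, Ne.symm hk]
  rw [hflat (bKeys xs) (bKeys_nodup xs)]
  by_cases hc : c ∈ bKeys xs
  · simp [hc]
  · have : c ∉ xs.map (fun t => t.2) := fun h => hc ((mem_bKeys xs c).mpr h)
    rw [if_neg hc, Eq.comm, List.filter_eq_nil_iff]
    intro t ht
    simp only [beq_iff_eq]
    intro h2
    exact this (List.mem_map.mpr ⟨t, ht, h2⟩)

theorem alt_perm (xs : List (String × Int)) : (word_count_sort_alt xs).Perm xs := by
  rw [word_count_sort_alt_eq_flat]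
  refine List.perm_iff_count.mpr ?_
  intro t
  have hcount : ∀ K : List Int, K.Nodup →
      ((K.flatMap (fun c => xs.filter (fun t => t.2 == c))).count t) =
        if t.2 ∈ K then xs.count t else 0 := by
    intro K hnd
    induction K with
    | nil => simp
    | cons k K' ih =>
        rw [List.flatMap_cons, List.count_append, ih (List.nodup_cons.mp hnd).2]
        by_cases hk : t.2 = k
        · have hkn : k ∉ K' := (List.nodup_cons.mp hnd).1
          have h1 : (xs.filter (fun t => t.2 == k)).count t = xs.count t :=
            List.count_filter (by simpa using hk)
          have h2 : t.2 ∉ K' := hk ▸ hkn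
          rw [h1, if_neg h2, if_pos (show t.2 ∈ k :: K' by simp [hk])]
          omega
        · have h1 : (xs.filter (fun t => t.2 == k)).count t = 0 := by
            rw [List.count_eq_zero]
            intro hm
            exact hk (by simpa using (List.mem_filter.mp hm).2)
          simp [h1, hk]
  rw [hcount (bKeys xs) (bKeys_nodup xs)]
  by_cases ht : t.2 ∈ bKeys xs
  · simp [ht]
  · have htx : t ∉ xs := fun hm =>
      ht ((mem_bKeys xs t.2).mpr (List.mem_map.mpr ⟨t, hm, rfl⟩))
    simp [ht, List.count_eq_zero.mpr htx]

-- uniqueness of the stable descending order: two mutually permuted lists with non-increasing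
-- counts and identical per-count filters are equal
theorem stable_unique (l1 : List (String × Int)) :
    ∀ (l2 : List (String × Int)), l1.Perm l2 → DescKey l1 → DescKey l2 →
      (∀ c, l1.filter (fun t => t.2 == c) = l2.filter (fun t => t.2 == c)) → l1 = l2 := by
  induction l1 with
  | nil =>
      intro l2 hperm _ _ _
      exact (hperm.nil_eq).symm ▸ rfl
  | cons a t1 ih =>
      intro l2 hperm h1 h2 hfil
      rcases l2 with _ | ⟨b, t2⟩
      · exact absurd hperm.symm.nil_eq (by simp)
      have hab2 : a.2 = b.2 := by
        have hbmem : b ∈ a :: t1 := hperm.mem_iff.mpr (by simp)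
        have hamem : a ∈ b :: t2 := hperm.mem_iff.mp (by simp)
        have hb_le : b.2 ≤ a.2 := by
          rcases List.mem_cons.mp hbmem with h | h
          · simp [h]
          · exact (List.pairwise_cons.mp h1).1 b h
        have ha_le : a.2 ≤ b.2 := by
          rcases List.mem_cons.mp hamem with h | h
          · simp [h]
          · exact (List.pairwise_cons.mp h2).1 a h
        omega
      have hf := hfil a.2
      rw [List.filter_cons, List.filter_cons] at hf
      simp only [beq_self_eq_true, if_true] at hf
      rw [if_pos (by simpa using hab2.symm)] at hf
      have hob : a = b := (List.cons.injEq _ _ _ _ ▸ hf).1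
      subst hob
      have htperm : t1.Perm t2 := hperm.cons_inv
      have hteq : t1 = t2 := by
        refine ih t2 htperm (List.pairwise_cons.mp h1).2 (List.pairwise_cons.mp h2).2 ?_
        intro c
        by_cases hc : a.2 = c
        · rw [← hc]
          exact (List.cons.injEq _ _ _ _ ▸ hf).2
        · have := hfil c
          rw [List.filter_cons, List.filter_cons, if_neg (by simpa using hc),
            if_neg (by simpa using hc)] at this
          exact this
      rw [hteq]

-- ===== VERDICT (by name: the statement is the Claim_ definition above) =====
theorem word_count_sort_spec : Claim_equal_word_count_sort := by
  intro xs _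
  unfold Spec_word_count_sort
  rw [word_count_sort_eq_sRef]
  exact stable_unique (sRef xs) (word_count_sort_alt xs)
    ((sRef_perm xs).trans (alt_perm xs).symm)
    (sRef_pairwise xs) (alt_pairwise xs)
    (fun c => (filter_sRef xs c).trans (alt_filter xs c).symm)
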